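-- pv_equiv track=rewrite | github.com/Neutrollized/mr-stylist | helpers/clothing_utils.py | any_list_element_in_string
-- ===== SOURCE A (Python) =====
-- from typing import List
--
-- def any_list_element_in_string(input_list_of_lists: List[List[str]], input_string: str) -> int:
--   """
--   Checks if any element from any of the inner lists (clothing categories) is present in the input string.
--
--   The comparison is case-insensitive.
--
--   Args:
--       input_list_of_lists: A list of lists, where each inner list contains keyword strings
--                            (e.g., `CLOTHING_CATEGORIES`).
--       input_string: The string to check for the presence of these keywords.
--
--   Returns:
--       The number of distinct inner lists (categories) that have at least one keyword
--       present in the `input_string`. Returns 0 if `input_string` is empty or no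
--       keywords from any category are found.
--   """
--   if not input_string:
--     return 0
--
--   match_count = 0
--   input_string_lower = input_string.lower() # For case-insensitive matching
--
--   for word_list in input_list_of_lists:
--     # Check if any word from the current word_list is in input_string_lower
--     if any(word.lower() in input_string_lower for word in word_list):
--       match_count += 1
--       # No 'break' here if we want to count all categories that match.
--       # The original logic had a 'break', which means it counted a category
--       # if *any* word from that category matched, then moved to the next category.
--       # The current implementation (and the original one after the loop fix)
--       # counts how many *categories* have at least one match.
--       # If the intention was to count total *word* matches, the logic would be different.
--       # The docstring implies counting categories with matches.
--       # The original break was inside the inner loop, meaning after finding one word from a list,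
--       # it would increment match_count and break from checking other words *in that same list*.
--       # This is correct for "number of inner lists that have at least one word present".
--   return match_count
-- ===== SOURCE B (Python) =====
-- def any_list_element_in_string(input_list_of_lists, input_string):
--   if not input_string:
--     return 0
--   s = input_string.lower()
--   # hash-set multi-pattern search: test each substring of s whose length is a
--   # keyword length against the keyword set, then count the distinct categories
--   # owning a found keyword
--   words = {w.lower() for wl in input_list_of_lists for w in wl}
--   found = set()
--   for m in {len(w) for w in words}:
--     for j in range(len(s) - m + 1):
--       sub = s[j:j+m]
--       if sub in words:
--         found.add(sub)
--   matched = {i for i, wl in enumerate(input_list_of_lists)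
--                for w in wl if w.lower() in found}
--   return len(matched)
-- ===== Notes on version B (the rewrite author's own statement) =====
-- stated objective: alternative
-- what changed: A scans each category's keywords and substring-searches each one in the text; B inverts the search: it hashes all lowered keywords into a set, slides over the text once per distinct keyword length testing each substring against that set, and then counts the distinct categories owning a found keyword.
import Mathlib
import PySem

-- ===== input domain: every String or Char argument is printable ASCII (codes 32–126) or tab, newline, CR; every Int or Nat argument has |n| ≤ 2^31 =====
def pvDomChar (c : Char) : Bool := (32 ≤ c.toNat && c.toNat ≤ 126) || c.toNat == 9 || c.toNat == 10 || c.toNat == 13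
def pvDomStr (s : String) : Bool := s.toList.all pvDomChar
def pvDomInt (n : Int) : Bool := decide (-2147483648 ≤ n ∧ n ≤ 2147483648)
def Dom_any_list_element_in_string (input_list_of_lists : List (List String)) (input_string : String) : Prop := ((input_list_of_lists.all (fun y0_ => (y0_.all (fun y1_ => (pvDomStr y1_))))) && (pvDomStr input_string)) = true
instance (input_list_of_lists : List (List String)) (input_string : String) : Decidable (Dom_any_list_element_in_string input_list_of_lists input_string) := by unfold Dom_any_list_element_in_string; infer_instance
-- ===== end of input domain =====

-- B replaces A's per-category scan of keywords against the text by a text-side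
-- multi-pattern search: hash all lowered keywords, test each substring of the text
-- whose length is a keyword length against that set, then count the distinct
-- categories owning a found keyword (objective: alternative algorithm).

-- ===== PORT A =====
def any_list_element_in_string (input_list_of_lists : List (List String)) (input_string : String) : Int :=
  if input_string = "" then 0
  else
    let input_string_lower := PySem.Str.lower input_string
    input_list_of_lists.foldl
      (fun match_count word_list =>
        if word_list.any (fun word => PySem.Str.isIn (PySem.Str.lower word) input_string_lower)
        then match_count + 1 else match_count) 0

-- ===== PORT B =====
-- B's local variables 'words', 'found', 'matched' become the helpers below (same computations)
def pvWordsB (input_list_of_lists : List (List String)) : PySem.Set String :=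
  PySem.Set.ofList (input_list_of_lists.flatMap (fun wl => wl.map (fun w => PySem.Str.lower w)))

def pvLengthsB (input_list_of_lists : List (List String)) : PySem.Set Int :=
  PySem.Set.ofList ((pvWordsB input_list_of_lists).map (fun w => PySem.Str.len w))

def pvFoundB (input_list_of_lists : List (List String)) (s : String) : PySem.Set String :=
  (pvLengthsB input_list_of_lists).foldl
    (fun found m =>
      (PySem.List.pyRange 0 (PySem.Str.len s - m + 1) 1).foldl
        (fun found j =>
          if (pvWordsB input_list_of_lists).contains (PySem.Str.slice s (some j) (some (j + m)))
          then PySem.Set.add found (PySem.Str.slice s (some j) (some (j + m)))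
          else found)
        found)
    PySem.Set.empty

def any_list_element_in_string_alt (input_list_of_lists : List (List String)) (input_string : String) : Int :=
  if input_string = "" then 0
  else
    let s := PySem.Str.lower input_string
    let matched : PySem.Set Int := PySem.Set.ofList
      ((PySem.List.enumerate input_list_of_lists 0).flatMap
        (fun p => (p.2.filter (fun w =>
            (pvFoundB input_list_of_lists s).contains (PySem.Str.lower w))).map (fun _ => p.1)))
    (matched.length : Int)

-- ===== PRECONDITION & SPEC =====
def Spec_any_list_element_in_string (input_list_of_lists : List (List String)) (input_string : String) (out : Int) : Prop := out = any_list_element_in_string_alt input_list_of_lists input_string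
instance (input_list_of_lists : List (List String)) (input_string : String) (out : Int) : Decidable (Spec_any_list_element_in_string input_list_of_lists input_string out) := by unfold Spec_any_list_element_in_string; infer_instance

-- ===== CLAIM (what is proved, stated in full; the proofs are below) =====
def Claim_equal_any_list_element_in_string : Prop := ∀ (input_list_of_lists : List (List String)) (input_string : String), Dom_any_list_element_in_string input_list_of_lists input_string → Spec_any_list_element_in_string input_list_of_lists input_string (any_list_element_in_string input_list_of_lists input_string)

-- ===== LEMMAS AND PROOFS =====

-- A's counting loop computes the accumulator plus the number of lists satisfying the predicate.
theorem pv_foldl_count {α : Type} (p : α → Bool) :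
    ∀ (L : List α) (a : Int),
      L.foldl (fun acc x => if p x then acc + 1 else acc) a = a + (L.countP p : Int) := by
  intro L; induction L with
  | nil => intro a; simp
  | cons x xs ih =>
    intro a
    simp only [List.foldl_cons, List.countP_cons, ih]
    by_cases h : p x = true
    · simp [h]; omega
    · simp [h]

-- updating a set with copies of one single element adds it once (or not at all when there are none)
theorem pv_update_const {α β : Type} [DecidableEq β] (k : β) :
    ∀ (xs : List α) (s : PySem.Set β),
      PySem.Set.update s (xs.map (fun _ => k)) =
        if xs = [] then s else PySem.Set.add s k := by
  intro xs; induction xs with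
  | nil => intro s; simp [PySem.Set.update]
  | cons x xs ih =>
    intro s
    simp only [List.map_cons, PySem.Set.update_cons, ih]
    by_cases h : xs = []
    · simp [h]
    · rw [if_neg h, if_neg (by simp), PySem.Set.add_of_mem (by simp [PySem.Set.mem_add])]

-- key invariant: updating a set of indices all below k with B's comprehension list
-- (indices from k upward) grows the set by exactly the number of matching lists
theorem pv_key (f : String → Bool) :
    ∀ (L : List (List String)) (k : Int) (s : PySem.Set Int),
      (∀ x ∈ s, x < k) →
      (PySem.Set.update s
        ((PySem.List.enumerate L k).flatMap
          (fun p => (p.2.filter f).map (fun _ => p.1)))).length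
        = s.length + L.countP (fun wl => wl.any f) := by
  intro L; induction L with
  | nil => intro k s _; simp [PySem.List.enumerate_nil]
  | cons wl rest ih =>
    intro k s hs
    rw [PySem.List.enumerate_cons, List.flatMap_cons, PySem.Set.update_append,
        pv_update_const]
    dsimp only
    have hk : k ∉ s := fun h => lt_irrefl k (hs k h)
    by_cases hnil : wl.filter f = []
    · have h : wl.any f = false := by
        rw [List.any_eq_false]
        intro w hw hf
        have : w ∈ wl.filter f := List.mem_filter.mpr ⟨hw, hf⟩
        simp [hnil] at this
      rw [if_pos hnil, ih (k + 1) s (fun x hx => lt_trans (hs x hx) (by omega))]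
      simp [h]
    · have h : wl.any f = true := by
        rcases List.ne_nil_iff_exists_cons.mp hnil with ⟨w, tl, hw⟩
        have : w ∈ wl.filter f := by simp [hw]
        rcases List.mem_filter.mp this with ⟨hmem, hf⟩
        exact List.any_eq_true.mpr ⟨w, hmem, hf⟩
      rw [if_neg hnil, PySem.Set.add_of_not_mem hk,
          ih (k + 1) (s ++ [k]) (by
            intro x hx
            rcases List.mem_append.mp hx with hx | hx
            · exact lt_trans (hs x hx) (by omega)
            · simp at hx; omega)]
      simp [h]
      omega

-- membership in a fold that conditionally adds g a
theorem pv_mem_foldl_add_if {α β : Type} [BEq β] [LawfulBEq β] (c : α → Bool) (g : α → β) :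
    ∀ (l : List α) (fd : PySem.Set β) (x : β),
      x ∈ l.foldl (fun fd a => if c a then PySem.Set.add fd (g a) else fd) fd
        ↔ x ∈ fd ∨ ∃ a ∈ l, c a = true ∧ x = g a := by
  intro l; induction l with
  | nil => intro fd x; simp
  | cons a l ih =>
    intro fd x
    simp only [List.foldl_cons]
    rw [ih]
    by_cases h : c a = true
    · rw [if_pos h]
      simp only [PySem.Set.mem_add, List.mem_cons]
      constructor
      · rintro ((hx | hx) | ⟨b, hb, hc, hg⟩)
        · exact Or.inl hx
        · exact Or.inr ⟨a, Or.inl rfl, h, hx⟩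
        · exact Or.inr ⟨b, Or.inr hb, hc, hg⟩
      · rintro (hx | ⟨b, (rfl | hb), hc, hg⟩)
        · exact Or.inl (Or.inl hx)
        · exact Or.inl (Or.inr hg)
        · exact Or.inr ⟨b, hb, hc, hg⟩
    · rw [if_neg h]
      simp only [List.mem_cons]
      constructor
      · rintro (hx | ⟨b, hb, hc, hg⟩)
        · exact Or.inl hx
        · exact Or.inr ⟨b, Or.inr hb, hc, hg⟩
      · rintro (hx | ⟨b, (rfl | hb), hc, hg⟩)
        · exact Or.inl hx
        · exact absurd hc h
        · exact Or.inr ⟨b, hb, hc, hg⟩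

-- membership in a fold each of whose steps adds exactly the elements satisfying P a
theorem pv_mem_foldl_step {α β : Type} (step : PySem.Set β → α → PySem.Set β) (P : α → β → Prop)
    (h : ∀ (fd : PySem.Set β) (a : α) (x : β), x ∈ step fd a ↔ x ∈ fd ∨ P a x) :
    ∀ (l : List α) (fd : PySem.Set β) (x : β),
      x ∈ l.foldl step fd ↔ x ∈ fd ∨ ∃ a ∈ l, P a x := by
  intro l; induction l with
  | nil => intro fd x; simp
  | cons a l ih =>
    intro fd x
    simp only [List.foldl_cons]
    rw [ih, h]
    simp only [List.mem_cons]
    constructor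
    · rintro ((hx | hp) | ⟨b, hb, hp⟩)
      · exact Or.inl hx
      · exact Or.inr ⟨a, Or.inl rfl, hp⟩
      · exact Or.inr ⟨b, Or.inr hb, hp⟩
    · rintro (hx | ⟨b, (rfl | hb), hp⟩)
      · exact Or.inl (Or.inl hx)
      · exact Or.inl (Or.inr hp)
      · exact Or.inr ⟨b, hb, hp⟩

-- characterization of B's 'found' set: exactly the keyword-length slices of s that are keywords
theorem pv_mem_found (L : List (List String)) (s x : String) :
    x ∈ pvFoundB L s ↔ ∃ m ∈ pvLengthsB L,
      ∃ j ∈ PySem.List.pyRange 0 (PySem.Str.len s - m + 1) 1,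
        (pvWordsB L).contains (PySem.Str.slice s (some j) (some (j + m))) = true ∧
        x = PySem.Str.slice s (some j) (some (j + m)) := by
  unfold pvFoundB
  refine Iff.trans
    (pv_mem_foldl_step _
      (fun m x => ∃ j ∈ PySem.List.pyRange 0 (PySem.Str.len s - m + 1) 1,
        (pvWordsB L).contains (PySem.Str.slice s (some j) (some (j + m))) = true ∧
        x = PySem.Str.slice s (some j) (some (j + m)))
      (fun fd m x => pv_mem_foldl_add_if
        (fun j => (pvWordsB L).contains (PySem.Str.slice s (some j) (some (j + m))))
        (fun j => PySem.Str.slice s (some j) (some (j + m))) _ fd x)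
      (pvLengthsB L) PySem.Set.empty x) ?_
  simp [PySem.Set.empty]

-- lengths in pvLengthsB are nonnegative
theorem pv_lengths_nonneg (L : List (List String)) (m : Int) (hm : m ∈ pvLengthsB L) : 0 ≤ m := by
  unfold pvLengthsB at hm
  rw [PySem.Set.mem_ofList] at hm
  rcases List.mem_map.mp hm with ⟨w, _, rfl⟩
  rw [PySem.Str.len_eq]
  positivity

-- soundness: everything in 'found' is a keyword that occurs in s
theorem pv_found_sound (L : List (List String)) (s x : String) (hx : x ∈ pvFoundB L s) :
    x ∈ pvWordsB L ∧ PySem.Str.isIn x s = true := by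
  rw [pv_mem_found] at hx
  obtain ⟨m, hm, j, hj, hc, rfl⟩ := hx
  have h0j : 0 ≤ j := (PySem.List.mem_pyRange_one.mp hj).1
  have h0m : 0 ≤ m := pv_lengths_nonneg L m hm
  refine ⟨(PySem.Set.contains_iff _ _).mp hc, ?_⟩
  rw [PySem.Str.isIn_iff_infix, PySem.Str.toList_slice, PySem.Chars.slice_eq_listSlice,
      PySem.List.slice_toNat _ h0j (by omega)]
  exact ((List.take_prefix _ _).isInfix).trans ((List.drop_suffix _ _).isInfix)

-- completeness: every keyword that occurs in s is in 'found'
theorem pv_found_complete (L : List (List String)) (s x : String)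
    (hx : x ∈ pvWordsB L) (hin : PySem.Str.isIn x s = true) : x ∈ pvFoundB L s := by
  obtain ⟨pre, suf, hps⟩ := (PySem.Str.isIn_iff_infix x s).mp hin
  have hdrop : s.toList.drop pre.length = x.toList ++ suf := by
    rw [← hps]; simp
  have hlen : pre.length + x.toList.length ≤ s.toList.length := by
    rw [← hps]; simp
  have hslice : PySem.Str.slice s (some (pre.length : Int))
      (some ((pre.length : Int) + PySem.Str.len x)) = x := by
    apply String.toList_inj.mp
    rw [PySem.Str.toList_slice, PySem.Chars.slice_eq_listSlice, PySem.Str.len_eq,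
        PySem.List.slice_natCast_add, hdrop]
    simp
  rw [pv_mem_found]
  refine ⟨PySem.Str.len x, ?_, (pre.length : Int), ?_, ?_, ?_⟩
  · unfold pvLengthsB
    rw [PySem.Set.mem_ofList]
    exact List.mem_map.mpr ⟨x, hx, rfl⟩
  · rw [PySem.List.mem_pyRange_one, PySem.Str.len_eq, PySem.Str.len_eq]
    omega
  · rw [hslice]
    exact (PySem.Set.contains_iff _ _).mpr hx
  · rw [hslice]

-- for a keyword, membership in 'found' is exactly occurrence in s
theorem pv_contains_found_eq (L : List (List String)) (s w : String) (hw : w ∈ pvWordsB L) :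
    (pvFoundB L s).contains w = PySem.Str.isIn w s := by
  by_cases h : PySem.Str.isIn w s = true
  · rw [h]
    exact (PySem.Set.contains_iff _ _).mpr (pv_found_complete L s w hw h)
  · rw [Bool.not_eq_true] at h
    rw [h]
    rw [← Bool.not_eq_true] at h ⊢
    intro hc
    exact h ((pv_found_sound L s w ((PySem.Set.contains_iff _ _).mp hc)).2)

-- ===== VERDICT (by name: the statement is the Claim_ definition above) =====
theorem any_list_element_in_string_spec : Claim_equal_any_list_element_in_string := by
  intro L s _
  unfold Spec_any_list_element_in_string
  by_cases hs : s = ""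
  · simp [any_list_element_in_string, any_list_element_in_string_alt, hs]
  · have hA : any_list_element_in_string L s =
        (L.countP (fun wl => wl.any (fun w =>
          PySem.Str.isIn (PySem.Str.lower w) (PySem.Str.lower s))) : Int) := by
      unfold any_list_element_in_string
      rw [if_neg hs, pv_foldl_count]
      simp
    have hB : any_list_element_in_string_alt L s =
        (L.countP (fun wl => wl.any (fun w =>
          (pvFoundB L (PySem.Str.lower s)).contains (PySem.Str.lower w))) : Int) := by
      unfold any_list_element_in_string_alt
      rw [if_neg hs]
      show ((PySem.Set.ofList
        ((PySem.List.enumerate L 0).flatMap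
          (fun p => (p.2.filter (fun w =>
              (pvFoundB L (PySem.Str.lower s)).contains (PySem.Str.lower w))).map (fun _ => p.1)))).length : Int) = _
      rw [← PySem.Set.update_empty,
          pv_key (fun w => (pvFoundB L (PySem.Str.lower s)).contains (PySem.Str.lower w)) L 0
            PySem.Set.empty (by intro x hx; simp [PySem.Set.empty] at hx)]
      simp [PySem.Set.empty]
    rw [hA, hB]
    congr 1
    apply List.countP_congr
    intro wl hwl
    simp only [List.any_eq_true]
    constructor
    · rintro ⟨w, hw, hin⟩
      refine ⟨w, hw, ?_⟩
      rw [pv_contains_found_eq L (PySem.Str.lower s) (PySem.Str.lower w) ?_]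
      · exact hin
      · unfold pvWordsB
        rw [PySem.Set.mem_ofList]
        exact List.mem_flatMap.mpr ⟨wl, hwl, List.mem_map.mpr ⟨w, hw, rfl⟩⟩
    · rintro ⟨w, hw, hin⟩
      refine ⟨w, hw, ?_⟩
      rw [pv_contains_found_eq L (PySem.Str.lower s) (PySem.Str.lower w) ?_] at hin
      · exact hin
      · unfold pvWordsB
        rw [PySem.Set.mem_ofList]
        exact List.mem_flatMap.mpr ⟨wl, hwl, List.mem_map.mpr ⟨w, hw, rfl⟩⟩
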